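-- pv_equiv track=rewrite | github.com/Arigii/potencial | redistribution_method/matrix_dilution.py | matrix_dilution
-- ===== SOURCE A (Python) =====
-- def matrix_dilution(cost_matrix: list[list[int]]) -> list[list[int]]:
--     sparse_matrix = []
--
--     for row in cost_matrix:
--         min_unit = min(row)
--         sparse_matrix.append([item - min_unit for item in row])
--
--     for column_index in range(len(sparse_matrix[0])):
--         min_unit = min([item[column_index] for item in sparse_matrix])
--         for item in sparse_matrix:
--             item[column_index] -= min_unit
--
--     return sparse_matrix
-- ===== SOURCE B (Python) =====
-- def matrix_dilution(cost_matrix: list[list[int]]) -> list[list[int]]: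
--     def row_reduce(m):
--         return [[x - min(row) for x in row] for row in m]
--
--     def transpose(m):
--         return [[m[i][j] for i in range(len(m))] for j in range(len(m[0]))]
--
--     return transpose(row_reduce(transpose(row_reduce(cost_matrix))))
-- ===== Notes on version B (the rewrite author's own statement) =====
-- stated objective: alternative
-- what changed: B has no column loop and no in-place mutation at all: it defines one reusable row-reduction helper (subtract each row's minimum) and an index-based transpose, and computes the answer as transpose(row_reduce(transpose(row_reduce(m)))) - column reduction becomes row reduction of the transpose.
-- outside the precondition, e.g. on matrix_dilution([[1, 2], [3, 4, 9]]): A returns [[0, 0], [0, 0, 6]], B returns [[0, 0], [0, 0]]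
import Mathlib
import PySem

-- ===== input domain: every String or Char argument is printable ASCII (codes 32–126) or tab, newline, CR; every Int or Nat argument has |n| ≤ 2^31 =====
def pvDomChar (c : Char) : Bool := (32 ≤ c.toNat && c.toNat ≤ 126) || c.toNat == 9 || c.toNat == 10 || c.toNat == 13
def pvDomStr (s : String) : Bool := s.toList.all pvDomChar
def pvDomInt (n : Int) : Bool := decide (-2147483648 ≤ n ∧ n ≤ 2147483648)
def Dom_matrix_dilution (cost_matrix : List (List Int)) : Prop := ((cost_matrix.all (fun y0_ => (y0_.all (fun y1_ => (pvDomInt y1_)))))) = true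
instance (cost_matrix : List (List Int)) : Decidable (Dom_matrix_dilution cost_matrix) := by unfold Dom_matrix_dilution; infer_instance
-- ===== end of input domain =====

-- B is an alternative implementation: it has no column loop and never mutates; it applies one
-- row-reduction helper twice around an index-based transpose.  Equivalence is claimed on
-- nonempty rectangular matrices with nonempty rows.

-- ===== PORT A =====
def matrix_dilution (cost_matrix : List (List Int)) : List (List Int) :=
  -- first loop: sparse_matrix.append([item - min(row) for item in row])
  let sparse := cost_matrix.foldl (fun acc row =>
      let min_unit := (PySem.List.min? row (fun x => x)).getD 0
      acc ++ [row.map (fun item => item - min_unit)]) []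
  -- second loop: for column_index in range(len(sparse_matrix[0])): subtract the column minimum in place
  (List.range (sparse.headD []).length).foldl (fun sp column_index =>
      let min_unit := (PySem.List.min? (sp.map (fun item => item.getD column_index 0)) (fun x => x)).getD 0
      sp.map (fun item => item.set column_index (item.getD column_index 0 - min_unit))) sparse

-- ===== PORT B =====
-- row_reduce(m): [[x - min(row) for x in row] for row in m]
-- (min(row) is only evaluated by Python when row is nonempty; on an empty row the map is empty,
-- so the .getD 0 default is never observable)
def pvRowReduce (m : List (List Int)) : List (List Int) :=
  m.map (fun row => row.map (fun x => x - (PySem.List.min? row (fun y => y)).getD 0))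

-- transpose(m): [[m[i][j] for i in range(len(m))] for j in range(len(m[0]))]
-- (on the rectangular in-range inputs Pre_ admits every index is in range, so the .getD
-- defaults are never observable)
def pvTranspose (m : List (List Int)) : List (List Int) :=
  (List.range (m.headD []).length).map (fun j =>
    (List.range m.length).map (fun i => (m.getD i []).getD j 0))

def matrix_dilution_alt (cost_matrix : List (List Int)) : List (List Int) :=
  pvTranspose (pvRowReduce (pvTranspose (pvRowReduce cost_matrix)))

-- ===== PRECONDITION & SPEC =====
-- Pre_ excludes the empty matrix, matrices with an empty row, and matrices with a row shorter
-- than the first (A raises IndexError/ValueError there, and so does B), and ragged matrices with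
-- a row longer than the first, on which A's trailing cells being only row-reduced is an
-- accidental artefact of its column loop and B's rectangular output is equally defensible.
def Pre_matrix_dilution (cost_matrix : List (List Int)) : Prop :=
  cost_matrix ≠ [] ∧ ∀ row ∈ cost_matrix, row ≠ [] ∧ row.length = (cost_matrix.headD []).length
instance (cost_matrix : List (List Int)) : Decidable (Pre_matrix_dilution cost_matrix) := by
  unfold Pre_matrix_dilution; infer_instance
def pvWitness_matrix_dilution : List (List Int) := [[1, 2, 3], [4, 5, 6], [7, 9, 8]]
def Spec_matrix_dilution (cost_matrix : List (List Int)) (out : List (List Int)) : Prop := out = matrix_dilution_alt cost_matrix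
instance (cost_matrix : List (List Int)) (out : List (List Int)) : Decidable (Spec_matrix_dilution cost_matrix out) := by unfold Spec_matrix_dilution; infer_instance

-- ===== CLAIM (what is proved, stated in full; the proofs are below) =====
def Claim_equal_matrix_dilution : Prop := ∀ (cost_matrix : List (List Int)), Dom_matrix_dilution cost_matrix → Pre_matrix_dilution cost_matrix → Spec_matrix_dilution cost_matrix (matrix_dilution cost_matrix)

-- ===== LEMMAS AND PROOFS =====

-- min of a row, as both ports compute it
def pvRmin (r : List Int) : Int := (PySem.List.min? r (fun x => x)).getD 0

-- the row-reduced matrix after A's first loop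
def pvSp0 (c : List (List Int)) : List (List Int) :=
  c.map (fun row => row.map (fun x => x - pvRmin row))

-- column minimum of a matrix at column j
def pvCmin (M : List (List Int)) (j : Nat) : Int :=
  (PySem.List.min? (M.map (fun row => row.getD j 0)) (fun x => x)).getD 0

-- one step of A's column loop
def pvColStep (sp : List (List Int)) (j : Nat) : List (List Int) :=
  let m := (PySem.List.min? (sp.map (fun item => item.getD j 0)) (fun x => x)).getD 0
  sp.map (fun item => item.set j (item.getD j 0 - m))

lemma pvGetD_map_range (f : Nat → Int) (n k : Nat) :
    ((List.range n).map f).getD k 0 = if k < n then f k else 0 := by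
  simp [List.getD_eq_getElem?_getD, List.getElem?_map]
  split_ifs <;> simp_all

lemma pvRow_eta (row : List Int) :
    (List.range row.length).map (fun k => row.getD k 0) = row := by
  apply List.ext_getElem
  · simp
  · intro k h1 h2
    simp [List.getD_eq_getElem?_getD, List.getElem?_eq_getElem h2]

lemma pvSet_map_range (f : Nat → Int) (w j : Nat) (v : Int) :
    ((List.range w).map f).set j v
      = (List.range w).map (fun k => if k = j then v else f k) := by
  apply List.ext_getElem
  · simp
  · intro k h1 h2
    rw [List.getElem_set]
    simp only [List.getElem_map, List.getElem_range]
    by_cases h : j = k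
    · simp [h]
    · simp [h, Ne.symm h]

lemma pvColFold (M : List (List Int)) (w : Nat) (hw : ∀ r ∈ M, r.length = w)
    (j : Nat) (hj : j ≤ w) :
    (List.range j).foldl pvColStep M
      = M.map (fun row => (List.range w).map
          (fun k => row.getD k 0 - (if k < j then pvCmin M k else 0))) := by
  induction j with
  | zero =>
    simp only [List.range_zero, List.foldl_nil]
    conv_lhs => rw [← List.map_id M]
    apply List.map_congr_left
    intro row hr
    have hlen : row.length = w := hw row hr
    have hfun : (fun k => row.getD k 0 - (if k < 0 then pvCmin M k else 0))
        = fun k => row.getD k 0 := by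
      funext k; simp
    rw [id, hfun, ← hlen, pvRow_eta]
  | succ j ih =>
    have hj' : j ≤ w := Nat.le_of_succ_le hj
    have hjw : j < w := hj
    rw [List.range_succ, List.foldl_append, ih hj', List.foldl_cons, List.foldl_nil]
    unfold pvColStep
    have hmin :
        ((M.map (fun row => (List.range w).map
            (fun k => row.getD k 0 - (if k < j then pvCmin M k else 0)))).map
          (fun item => item.getD j 0))
        = M.map (fun row => row.getD j 0) := by
      rw [List.map_map]
      apply List.map_congr_left
      intro row _
      simp [Function.comp, hjw]
    rw [hmin]
    rw [List.map_map]
    apply List.map_congr_left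
    intro row _
    simp only [Function.comp]
    rw [pvGetD_map_range]
    simp only [hjw, if_pos, lt_irrefl, if_false, sub_zero]
    rw [pvSet_map_range]
    apply List.map_congr_left
    intro k hk
    simp only [List.mem_range] at hk
    by_cases hkj : k = j
    · subst hkj
      simp [pvCmin]
    · have : k < j + 1 ↔ k < j := by omega
      simp [hkj, this]

lemma pvGetDL_map_range (f : Nat → List Int) (n k : Nat) :
    ((List.range n).map f).getD k [] = if k < n then f k else [] := by
  simp [List.getD_eq_getElem?_getD, List.getElem?_map]
  split_ifs <;> simp_all

lemma pvMapEta (l : List (List Int)) (f : List Int → Int) :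
    (List.range l.length).map (fun i => f (l.getD i [])) = l.map f := by
  apply List.ext_getElem
  · simp
  · intro k h1 h2
    have hk : k < l.length := by simpa using h2
    simp [List.getD_eq_getElem?_getD, List.getElem?_eq_getElem hk]

-- ===== VERDICT (by name: the statement is the Claim_ definition above) =====
theorem matrix_dilution_spec : Claim_equal_matrix_dilution := by
  intro cs _ hpre
  obtain ⟨hne, hrows⟩ := hpre
  unfold Spec_matrix_dilution
  set w := (cs.headD []).length with hwdef
  have hw1 : 1 ≤ w := by
    obtain ⟨r, rest, rfl⟩ := List.exists_cons_of_ne_nil hne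
    have := hrows r (by simp)
    have hr : r ≠ [] := this.1
    have : r.length = w := this.2
    cases r with
    | nil => exact absurd rfl hr
    | cons a t => simp [← this]
  have hsp : cs.foldl (fun acc row =>
      let min_unit := (PySem.List.min? row (fun x => x)).getD 0
      acc ++ [row.map (fun item => item - min_unit)]) [] = pvSp0 cs := by
    rw [PySem.List.foldl_append_singleton_eq_map]
    rfl
  have hMne : pvSp0 cs ≠ [] := by
    simp [pvSp0]; exact hne
  have hhead : ((pvSp0 cs).headD []).length = w := by
    obtain ⟨r, rest, rfl⟩ := List.exists_cons_of_ne_nil hne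
    simp [pvSp0, hwdef]
  have hsp_rows : ∀ r ∈ pvSp0 cs, r.length = w := by
    intro r hr
    simp only [pvSp0, List.mem_map] at hr
    obtain ⟨row, hrow, rfl⟩ := hr
    simpa using (hrows row hrow).2
  have hA : matrix_dilution cs
      = (pvSp0 cs).map (fun row => (List.range w).map
          (fun k => row.getD k 0 - (if k < w then pvCmin (pvSp0 cs) k else 0))) := by
    unfold matrix_dilution
    simp only
    rw [hsp, hhead]
    exact pvColFold (pvSp0 cs) w hsp_rows w le_rfl
  -- B side
  have hRR : pvRowReduce cs = pvSp0 cs := rfl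
  have hT : pvTranspose (pvSp0 cs)
      = (List.range w).map (fun j => (pvSp0 cs).map (fun r => r.getD j 0)) := by
    unfold pvTranspose
    rw [hhead]
    apply List.map_congr_left
    intro j _
    exact pvMapEta (pvSp0 cs) (fun r => r.getD j 0)
  have hRT : pvRowReduce (pvTranspose (pvSp0 cs))
      = (List.range w).map (fun j =>
          ((pvSp0 cs).map (fun r => r.getD j 0)).map (fun x => x - pvCmin (pvSp0 cs) j)) := by
    rw [hT]
    unfold pvRowReduce
    rw [List.map_map]
    apply List.map_congr_left
    intro j _
    rfl
  have hRTlen : (pvRowReduce (pvTranspose (pvSp0 cs))).length = w := by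
    rw [hRT]; simp
  have hRThead : ((pvRowReduce (pvTranspose (pvSp0 cs))).headD []).length = cs.length := by
    rw [hRT]
    obtain ⟨w', hw'⟩ : ∃ w', w = w' + 1 := ⟨w - 1, by omega⟩
    rw [hw', List.range_succ_eq_map]
    simp [pvSp0]
  have hB : matrix_dilution_alt cs
      = (List.range ((pvRowReduce (pvTranspose (pvSp0 cs))).headD []).length).map (fun i =>
          (List.range (pvRowReduce (pvTranspose (pvSp0 cs))).length).map (fun j =>
            ((pvRowReduce (pvTranspose (pvSp0 cs))).getD j []).getD i 0)) := rfl
  rw [hRThead, hRTlen] at hB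
  rw [hA, hB]
  apply List.ext_getElem
  · simp [pvSp0]
  · intro i h1 h2
    have hi : i < cs.length := by simpa [pvSp0] using h1
    simp only [List.getElem_map, List.getElem_range]
    apply List.ext_getElem
    · simp
    · intro j hj1 hj2
      have hjw : j < w := by simpa using hj1
      simp only [List.getElem_map, List.getElem_range]
      rw [if_pos hjw, hRT, pvGetDL_map_range, if_pos hjw]
      have hMi : i < (pvSp0 cs).length := by simpa [pvSp0] using hi
      have hcol : (((pvSp0 cs).map (fun r => r.getD j 0)).map
            (fun x => x - pvCmin (pvSp0 cs) j)).getD i 0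
          = ((pvSp0 cs)[i]'hMi).getD j 0 - pvCmin (pvSp0 cs) j := by
        rw [List.map_map]
        simp [List.getD_eq_getElem?_getD, List.getElem?_eq_getElem hMi]
      rw [hcol]
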